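-- pv_equiv track=rewrite | github.com/jhleepidl/graph-of-context | scripts/run_phase2_openai_debug_bundle.py | _choose_k_main
-- ===== SOURCE A (Python) =====
-- from typing import Dict, List, Optional, Tuple
--
-- def _choose_k_main(
--     ordered_threads: List[str],
--     counts: Dict[str, int],
--     lo: int = 80,
--     hi: int = 120,
--     target: int = 100,
-- ) -> Tuple[int, int]:
--     running = 0
--     for idx, thread_id in enumerate(ordered_threads, start=1):
--         running += int(counts.get(thread_id, 0))
--         if lo <= running <= hi:
--             return idx, running
--
--     running = 0
--     best = (0, 0, 10**9)
--     for idx, thread_id in enumerate(ordered_threads, start=1):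
--         running += int(counts.get(thread_id, 0))
--         if running > hi:
--             break
--         dist = abs(running - target)
--         if dist < best[2]:
--             best = (idx, running, dist)
--     if best[0] > 0:
--         return best[0], best[1]
--     total_all = sum(int(counts.get(tid, 0)) for tid in ordered_threads)
--     return len(ordered_threads), total_all
-- ===== SOURCE B (Python) =====
-- def _choose_k_main(ordered_threads, counts, lo=80, hi=120, target=100):
--     running = 0
--     best = (0, 0, 10**9)
--     open_ = True
--     for idx, thread_id in enumerate(ordered_threads, start=1):
--         running += int(counts.get(thread_id, 0))
--         if lo <= running <= hi:
--             return idx, running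
--         if open_:
--             if running > hi:
--                 open_ = False
--             else:
--                 dist = abs(running - target)
--                 if dist < best[2]:
--                     best = (idx, running, dist)
--     if best[0] > 0:
--         return best[0], best[1]
--     return len(ordered_threads), running
-- ===== Notes on version B (the rewrite author's own statement) =====
-- stated objective: alternative
-- what changed: Fuses A's two sequential prefix-sum passes (plus A's third full-sum pass for the fallback) into one traversal: the in-range early return is checked inline, the distance-to-target best is tracked behind a still-open flag that freezes at the first prefix exceeding hi, and the final running value replaces the separate total_all sum.
import Mathlib
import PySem

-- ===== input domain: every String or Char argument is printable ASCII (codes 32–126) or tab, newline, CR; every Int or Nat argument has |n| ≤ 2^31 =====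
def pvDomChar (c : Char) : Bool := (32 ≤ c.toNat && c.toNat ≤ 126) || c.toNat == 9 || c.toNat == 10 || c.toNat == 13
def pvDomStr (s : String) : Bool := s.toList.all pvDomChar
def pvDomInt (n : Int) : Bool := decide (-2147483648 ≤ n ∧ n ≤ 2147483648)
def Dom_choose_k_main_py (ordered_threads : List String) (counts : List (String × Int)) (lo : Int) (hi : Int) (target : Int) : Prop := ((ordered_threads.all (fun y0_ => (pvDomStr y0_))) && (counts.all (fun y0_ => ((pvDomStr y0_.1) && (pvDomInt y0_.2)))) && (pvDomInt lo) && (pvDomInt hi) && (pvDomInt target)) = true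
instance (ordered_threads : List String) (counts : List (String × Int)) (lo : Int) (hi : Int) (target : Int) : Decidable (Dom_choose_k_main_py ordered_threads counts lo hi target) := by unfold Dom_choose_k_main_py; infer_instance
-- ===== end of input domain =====

-- B fuses A's two prefix-sum passes (and A's separate total_all sum) into a single
-- traversal with a still-open flag for the best-by-distance tracker (objective: alternative, single-pass decomposition).

-- ===== PORT A =====
-- first loop of A: first index (1-based) whose prefix sum lands in [lo, hi]
def pvLoopA1 (counts : List (String × Int)) (lo hi : Int) : List String → Int → Int → Option (Int × Int)
  | [], _, _ => none
  | t :: ts, idx, running =>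
    let r := running + (PySem.Dict.ofList counts).getD t 0
    if lo ≤ r ∧ r ≤ hi then some (idx, r)
    else pvLoopA1 counts lo hi ts (idx + 1) r

-- second loop of A: best (idx, running, dist) by strict distance to target, breaking at running > hi
def pvLoopA2 (counts : List (String × Int)) (hi target : Int) : List String → Int → Int → Int × Int × Int → Int × Int × Int
  | [], _, _, best => best
  | t :: ts, idx, running, best =>
    let r := running + (PySem.Dict.ofList counts).getD t 0
    if r > hi then best
    else
      let dist := |r - target|
      let best' := if dist < best.2.2 then (idx, r, dist) else best
      pvLoopA2 counts hi target ts (idx + 1) r best'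

def choose_k_main_py (ordered_threads : List String) (counts : List (String × Int)) (lo : Int) (hi : Int) (target : Int) : Int × Int :=
  match pvLoopA1 counts lo hi ordered_threads 1 0 with
  | some p => p
  | none =>
    let best := pvLoopA2 counts hi target ordered_threads 1 0 (0, 0, 10 ^ 9)
    if best.1 > 0 then (best.1, best.2.1)
    else
      let total_all := ordered_threads.foldl (fun acc tid => acc + (PySem.Dict.ofList counts).getD tid 0) 0
      ((ordered_threads.length : Int), total_all)

-- ===== PORT B =====
-- single fused loop: inl = early in-range return; inr = (final running, best) at the end
def pvLoopB (counts : List (String × Int)) (lo hi target : Int) : List String → Int → Int → Int × Int × Int → Bool → Sum (Int × Int) (Int × (Int × Int × Int))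
  | [], _, running, best, _ => Sum.inr (running, best)
  | t :: ts, idx, running, best, opn =>
    let r := running + (PySem.Dict.ofList counts).getD t 0
    if lo ≤ r ∧ r ≤ hi then Sum.inl (idx, r)
    else
      if opn then
        if r > hi then pvLoopB counts lo hi target ts (idx + 1) r best false
        else
          let dist := |r - target|
          let best' := if dist < best.2.2 then (idx, r, dist) else best
          pvLoopB counts lo hi target ts (idx + 1) r best' true
      else pvLoopB counts lo hi target ts (idx + 1) r best false

def choose_k_main_py_alt (ordered_threads : List String) (counts : List (String × Int)) (lo : Int) (hi : Int) (target : Int) : Int × Int :=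
  match pvLoopB counts lo hi target ordered_threads 1 0 (0, 0, 10 ^ 9) true with
  | Sum.inl p => p
  | Sum.inr (running, best) =>
    if best.1 > 0 then (best.1, best.2.1)
    else ((ordered_threads.length : Int), running)

-- ===== PRECONDITION & SPEC =====
def Spec_choose_k_main_py (ordered_threads : List String) (counts : List (String × Int)) (lo : Int) (hi : Int) (target : Int) (out : Int × Int) : Prop := out = choose_k_main_py_alt ordered_threads counts lo hi target
instance (ordered_threads : List String) (counts : List (String × Int)) (lo : Int) (hi : Int) (target : Int) (out : Int × Int) : Decidable (Spec_choose_k_main_py ordered_threads counts lo hi target out) := by unfold Spec_choose_k_main_py; infer_instance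

-- ===== CLAIM (what is proved, stated in full; the proofs are below) =====
def Claim_equal_choose_k_main_py : Prop := ∀ (ordered_threads : List String) (counts : List (String × Int)) (lo : Int) (hi : Int) (target : Int), Dom_choose_k_main_py ordered_threads counts lo hi target → Spec_choose_k_main_py ordered_threads counts lo hi target (choose_k_main_py ordered_threads counts lo hi target)

-- ===== LEMMAS AND PROOFS =====

-- if A's first loop returns, B's fused loop returns the same pair early
theorem pvLoopB_of_some (counts : List (String × Int)) (lo hi target : Int) :
    ∀ (ts : List String) (idx running : Int) (best : Int × Int × Int) (opn : Bool) (p : Int × Int),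
      pvLoopA1 counts lo hi ts idx running = some p →
      pvLoopB counts lo hi target ts idx running best opn = Sum.inl p := by
  intro ts
  induction ts with
  | nil => intro idx running best opn p h; simp [pvLoopA1] at h
  | cons t ts ih =>
    intro idx running best opn p h
    simp only [pvLoopA1, pvLoopB] at *
    by_cases hr : lo ≤ running + (PySem.Dict.ofList counts).getD t 0 ∧
        running + (PySem.Dict.ofList counts).getD t 0 ≤ hi
    · simp [hr] at h ⊢; exact h
    · simp only [hr, if_false] at h ⊢
      cases opn with
      | false => exact ih _ _ _ _ _ h
      | true =>
        by_cases hhi : running + (PySem.Dict.ofList counts).getD t 0 > hi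
        · simp only [hhi, if_true]; exact ih _ _ _ _ _ h
        · simp only [hhi, if_false]; exact ih _ _ _ _ _ h

-- closed (opn = false) fused loop: best frozen, running accumulates everything
theorem pvLoopB_false (counts : List (String × Int)) (lo hi target : Int) :
    ∀ (ts : List String) (idx running : Int) (best : Int × Int × Int),
      pvLoopA1 counts lo hi ts idx running = none →
      pvLoopB counts lo hi target ts idx running best false =
        Sum.inr (ts.foldl (fun acc tid => acc + (PySem.Dict.ofList counts).getD tid 0) running, best) := by
  intro ts
  induction ts with
  | nil => intro idx running best _; simp [pvLoopB]
  | cons t ts ih =>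
    intro idx running best h
    simp only [pvLoopA1] at h
    by_cases hr : lo ≤ running + (PySem.Dict.ofList counts).getD t 0 ∧
        running + (PySem.Dict.ofList counts).getD t 0 ≤ hi
    · simp [hr] at h
    · simp only [hr, if_false] at h
      simp only [pvLoopB, hr, if_false, List.foldl_cons]
      exact ih _ _ _ h

-- open fused loop vs A's second loop, when A's first loop never fires
theorem pvLoopB_true (counts : List (String × Int)) (lo hi target : Int) :
    ∀ (ts : List String) (idx running : Int) (best : Int × Int × Int),
      pvLoopA1 counts lo hi ts idx running = none →
      pvLoopB counts lo hi target ts idx running best true =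
        Sum.inr (ts.foldl (fun acc tid => acc + (PySem.Dict.ofList counts).getD tid 0) running,
                 pvLoopA2 counts hi target ts idx running best) := by
  intro ts
  induction ts with
  | nil => intro idx running best _; simp [pvLoopB, pvLoopA2]
  | cons t ts ih =>
    intro idx running best h
    simp only [pvLoopA1] at h
    by_cases hr : lo ≤ running + (PySem.Dict.ofList counts).getD t 0 ∧
        running + (PySem.Dict.ofList counts).getD t 0 ≤ hi
    · simp [hr] at h
    · simp only [hr, if_false] at h
      simp only [pvLoopB, pvLoopA2, hr, if_false, List.foldl_cons]
      by_cases hhi : running + (PySem.Dict.ofList counts).getD t 0 > hi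
      · simp only [hhi, if_true]
        exact pvLoopB_false counts lo hi target ts _ _ best h
      · simp only [hhi, if_false]
        exact ih _ _ _ h

-- ===== VERDICT (by name: the statement is the Claim_ definition above) =====
theorem choose_k_main_py_spec : Claim_equal_choose_k_main_py := by
  intro ordered counts lo hi target _
  unfold Spec_choose_k_main_py choose_k_main_py choose_k_main_py_alt
  cases h : pvLoopA1 counts lo hi ordered 1 0 with
  | some p => rw [pvLoopB_of_some counts lo hi target ordered 1 0 (0, 0, 10 ^ 9) true p h]
  | none => rw [pvLoopB_true counts lo hi target ordered 1 0 (0, 0, 10 ^ 9) h]
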